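-- pv_equiv track=rewrite | github.com/wyLortel/funfuncoding | 프로그래머스/입문문제/진료순서 정하기.py | solution
-- ===== SOURCE A (Python) =====
-- def solution(emergency):
--     answer = []
--
--     lis = []
--
--     for i in emergency:
--         lis.append(i)
--
--     for i in range(len(emergency)):
--         for j in range(len(emergency)-1):
--             if emergency[j] < emergency[j+1]:
--                 emergency[j] , emergency[j+1] = emergency[j+1] , emergency[j]
--
--
--     for k in range(len(lis)):
--         for l in range(len(emergency)):
--             if lis[k] == emergency[l]:
--                 answer.append(l+1)
--
--
--     return answer
-- ===== SOURCE B (Python) =====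
-- def solution(emergency):
--     # counting-rank: no sorted list is ever built; each value's first rank is
--     # 1 + (number of strictly greater elements), and a value with multiplicity m
--     # occupies the m consecutive ranks starting there.
--     cnt = {}
--     for v in emergency:
--         cnt[v] = cnt.get(v, 0) + 1
--     first = {v: 1 + sum(1 for u in emergency if u > v) for v in cnt}
--     return [r for v in emergency for r in range(first[v], first[v] + cnt[v])]
-- ===== Notes on version B (the rewrite author's own statement) =====
-- stated objective: faster
-- what changed: B never sorts and never builds the descending list A searches: it counts multiplicities in one dict pass, computes each distinct value's first rank as 1 + (number of strictly greater elements), and emits each element's ranks as an arithmetic range first..first+count.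
import Mathlib
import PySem

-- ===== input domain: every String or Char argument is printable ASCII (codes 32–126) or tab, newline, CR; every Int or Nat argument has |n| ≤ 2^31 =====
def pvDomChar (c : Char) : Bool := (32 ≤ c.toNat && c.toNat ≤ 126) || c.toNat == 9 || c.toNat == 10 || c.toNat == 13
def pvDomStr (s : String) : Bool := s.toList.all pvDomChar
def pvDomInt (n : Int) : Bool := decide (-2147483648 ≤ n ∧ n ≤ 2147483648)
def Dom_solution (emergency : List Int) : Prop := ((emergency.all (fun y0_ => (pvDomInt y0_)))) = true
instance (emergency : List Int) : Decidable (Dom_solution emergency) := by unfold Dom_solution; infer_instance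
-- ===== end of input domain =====

-- B replaces A's bubble sort + per-element scan of the sorted list by counting: first rank of a
-- value = 1 + number of strictly greater elements, and its ranks are a consecutive range
-- (objective: alternative algorithm, no sorted list is built). A sorts its argument list in
-- place (an observable mutation B does not perform); the equivalence proved is about the RETURN value.

-- ===== PORT A =====
-- one step of A's inner loop (`if emergency[j] < emergency[j+1]: swap`);
-- every index used is in range by construction, so pyGetD/pySetD are exact here
def stepSwap (l : List Int) (j : Int) : List Int :=
  if PySem.List.pyGetD l j 0 < PySem.List.pyGetD l (j+1) 0 then
    PySem.List.pySetD (PySem.List.pySetD l j (PySem.List.pyGetD l (j+1) 0)) (j+1)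
      (PySem.List.pyGetD l j 0)
  else l

def solution (emergency : List Int) : List Int :=
  -- lis = copy of emergency built by appending
  let lis := emergency.foldl (fun acc i => acc ++ [i]) ([] : List Int)
  -- n passes of the adjacent-swap loop over the mutating list state
  let em := (PySem.List.pyRange 0 (PySem.List.len emergency) 1).foldl
      (fun a _i => (PySem.List.pyRange 0 (PySem.List.len a - 1) 1).foldl stepSwap a)
      emergency
  -- answer: for each k, every 1-based position l+1 with lis[k] == em[l]
  (PySem.List.pyRange 0 (PySem.List.len lis) 1).foldl
    (fun ans k =>
      (PySem.List.pyRange 0 (PySem.List.len em) 1).foldl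
        (fun ans2 l =>
          if PySem.List.pyGetD lis k 0 = PySem.List.pyGetD em l 0 then ans2 ++ [l + 1] else ans2)
        ans)
    []

-- ===== PORT B =====
def solution_alt (emergency : List Int) : List Int :=
  -- cnt[v] = cnt.get(v, 0) + 1
  let cnt := emergency.foldl (fun (d : PySem.Dict Int Int) v => d.insert v (d.getD v 0 + 1))
      PySem.Dict.empty
  -- first = {v: 1 + sum(1 for u in emergency if u > v) for v in cnt}
  let first := cnt.keys.foldl (fun (d : PySem.Dict Int Int) v =>
      d.insert v (1 + emergency.foldl (fun s u => if v < u then s + 1 else s) 0))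
      PySem.Dict.empty
  -- [r for v in emergency for r in range(first[v], first[v] + cnt[v])]
  -- first[v] / cnt[v]: v is always a key of both dicts, so getD is exact
  emergency.flatMap (fun v =>
    PySem.List.pyRange (first.getD v 0) (first.getD v 0 + cnt.getD v 0) 1)

-- ===== PRECONDITION & SPEC =====
def Spec_solution (emergency : List Int) (out : List Int) : Prop := out = solution_alt emergency
instance (emergency : List Int) (out : List Int) : Decidable (Spec_solution emergency out) := by unfold Spec_solution; infer_instance

-- ===== CLAIM (what is proved, stated in full; the proofs are below) =====
def Claim_equal_solution : Prop := ∀ (emergency : List Int), Dom_solution emergency → Spec_solution emergency (solution emergency)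

-- ===== LEMMAS AND PROOFS =====

-- recursive form of one left-to-right adjacent-swap pass
def bpass : List Int → List Int
  | [] => []
  | [a] => [a]
  | a :: b :: t => if a < b then b :: bpass (a :: t) else a :: bpass (b :: t)

-- the 1-based positions (starting at i) of v in t, in order
def occ : List Int → Int → Int → List Int
  | [], _, _ => []
  | y :: t, i, v => if v = y then i :: occ t (i+1) v else occ t (i+1) v

theorem bpass_perm (l : List Int) : (bpass l).Perm l := by
  fun_induction bpass l with
  | case1 => rfl
  | case2 a => rfl
  | case3 a b t h ih => exact (ih.cons b).trans (List.Perm.swap a b t)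
  | case4 a b t h ih => exact ih.cons a

theorem bpass_fix (l : List Int) (h : l.Pairwise (fun a b => b ≤ a)) : bpass l = l := by
  fun_induction bpass l with
  | case1 => rfl
  | case2 a => rfl
  | case3 a b t hlt ih => simp at h; omega
  | case4 a b t hlt ih =>
    rw [List.pairwise_cons] at h
    rw [ih h.2]

theorem bpass_append (a b : List Int) (hc : ∀ x ∈ a, ∀ y ∈ b, y ≤ x)
    (hb : b.Pairwise (fun x y => y ≤ x)) : bpass (a ++ b) = bpass a ++ b := by
  revert hc
  fun_induction bpass a with
  | case1 => intro _; simpa using bpass_fix b hb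
  | case2 x =>
    intro hc
    cases b with
    | nil => simp [bpass]
    | cons y b' =>
      have hxy : ¬ x < y := not_lt.mpr (hc x (by simp) y (by simp))
      simp only [List.cons_append, List.nil_append, bpass, if_neg hxy]
      rw [bpass_fix (y :: b') hb]
  | case3 x x2 t h ih =>
    intro hc
    simp only [List.cons_append, bpass, if_pos h]
    rw [← List.cons_append, ih (fun z hz y hy => hc z (by rcases List.mem_cons.mp hz with h'|h' <;> simp [h']) y hy)]
  | case4 x x2 t h ih =>
    intro hc
    simp only [List.cons_append, bpass, if_neg h]
    rw [← List.cons_append, ih (fun z hz y hy => hc z (by rcases List.mem_cons.mp hz with h'|h' <;> simp [h']) y hy)]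

theorem bpass_last (l : List Int) (h : l ≠ []) :
    ∃ init c, bpass l = init ++ [c] ∧ ∀ y ∈ l, c ≤ y := by
  fun_induction bpass l with
  | case1 => exact absurd rfl h
  | case2 a => exact ⟨[], a, by simp, by simp⟩
  | case3 a b t hlt ih =>
    obtain ⟨init, c, he, hm⟩ := ih (by simp)
    refine ⟨b :: init, c, by simp [he], ?_⟩
    intro y hy
    rcases List.mem_cons.mp hy with h1 | h1
    · subst h1; exact hm y (by simp)
    rcases List.mem_cons.mp h1 with h2 | h2
    · subst h2; exact (hm a (by simp)).trans hlt.le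
    · exact hm y (by simp [h2])
  | case4 a b t hlt ih =>
    obtain ⟨init, c, he, hm⟩ := ih (by simp)
    refine ⟨a :: init, c, by simp [he], ?_⟩
    intro y hy
    rcases List.mem_cons.mp hy with h1 | h1
    · subst h1; exact (hm b (by simp)).trans (by omega)
    · exact hm y h1

theorem bpass_inv (a : List Int) (k : Nat) :
    ∃ front back, bpass^[k] a = front ++ back ∧ back.Pairwise (fun x y => y ≤ x) ∧
      (∀ x ∈ front, ∀ y ∈ back, y ≤ x) ∧ min k a.length ≤ back.length ∧
      (front ++ back).Perm a := by
  induction k with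
  | zero => exact ⟨a, [], by simp, by simp, by simp, by simp, by simp⟩
  | succ k ih =>
    obtain ⟨front, back, he, hb, hc, hlen, hp⟩ := ih
    rw [Function.iterate_succ_apply', he]
    cases front with
    | nil =>
      refine ⟨[], back, by simpa using bpass_fix back hb, hb, by simp, ?_, hp⟩
      have : back.length = a.length := by simpa using hp.length_eq
      omega
    | cons f0 fr =>
      rw [bpass_append (f0 :: fr) back hc hb]
      obtain ⟨init, c, hbe, hm⟩ := bpass_last (f0 :: fr) (by simp)
      have hpf : (init ++ [c]).Perm (f0 :: fr) := hbe ▸ bpass_perm (f0 :: fr)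
      have hcmem : c ∈ f0 :: fr := hpf.mem_iff.mp (by simp)
      refine ⟨init, c :: back, by simp [hbe], ?_, ?_, ?_, ?_⟩
      · exact List.Pairwise.cons (fun y hy => hc c hcmem y hy) hb
      · intro x hx y hy
        have hxf : x ∈ f0 :: fr := hpf.mem_iff.mp (by simp [hx])
        rcases List.mem_cons.mp hy with h1 | h1
        · subst h1; exact hm x hxf
        · exact hc x hxf y h1
      · have : min k a.length ≤ back.length := hlen
        simp only [List.length_cons]
        omega
      · have h1 : (init ++ c :: back).Perm ((init ++ [c]) ++ back) := by simp
        exact h1.trans ((hpf.append_right back).trans hp)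

theorem iterate_bpass_sorted (a : List Int) :
    bpass^[a.length] a = PySem.List.sorted a (fun x => x) true := by
  obtain ⟨front, back, he, hb, hc, hlen, hp⟩ := bpass_inv a a.length
  have hfront : front = [] := by
    have := hp.length_eq; simp at this
    exact List.eq_nil_of_length_eq_zero (by omega)
  subst hfront
  simp only [List.nil_append] at he hp
  rw [he]
  exact PySem.List.eq_of_perm_of_pairwise_le_of_injective (fun z : Int => -z)
    (fun x y hxy => by simpa using hxy) (hp.trans (PySem.List.sorted_perm a (fun x => x) true).symm)
    (hb.imp (fun h => by simpa using h))
    ((PySem.List.sorted_pairwise_rev a (fun x => x)).imp (fun h => by simpa using h))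

theorem getD_append_len (pre : List Int) (x : Int) (t : List Int) :
    PySem.List.pyGetD (pre ++ x :: t) (pre.length : Int) 0 = x := by
  rw [PySem.List.pyGetD_natCast]
  simp [List.getD_eq_getElem?_getD]

theorem set_append_len (pre : List Int) (x v : Int) (l : List Int) :
    (pre ++ x :: l).set pre.length v = pre ++ v :: l := by
  induction pre with
  | nil => simp
  | cons p ps ih => simp [ih]

theorem innerFold (l : List Int) (pre : List Int) (x : Int) :
    (PySem.List.pyRange (pre.length : Int) ((pre.length : Int) + (l.length : Int)) 1).foldl
      stepSwap (pre ++ x :: l) = pre ++ bpass (x :: l) := by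
  induction l generalizing pre x with
  | nil => simp [PySem.List.pyRange_one_eq_nil, bpass]
  | cons b t ih =>
    rw [PySem.List.pyRange_one_cons (by push_cast [List.length_cons]; omega)]
    rw [List.foldl_cons]
    have hget1 : PySem.List.pyGetD (pre ++ x :: b :: t) (pre.length : Int) 0 = x :=
      getD_append_len pre x (b :: t)
    have hget2 : PySem.List.pyGetD (pre ++ x :: b :: t) ((pre.length : Int) + 1) 0 = b := by
      have : (pre.length : Int) + 1 = (((pre ++ [x]).length : Nat) : Int) := by simp
      rw [this, show pre ++ x :: b :: t = (pre ++ [x]) ++ b :: t by simp]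
      exact getD_append_len (pre ++ [x]) b t
    by_cases hxb : x < b
    · have hstep : stepSwap (pre ++ x :: b :: t) (pre.length : Int) = pre ++ b :: x :: t := by
        rw [stepSwap, hget1, hget2, if_pos hxb]
        rw [PySem.List.pySetD_natCast, set_append_len pre x b (b :: t)]
        have h1 : (pre.length : Int) + 1 = (((pre ++ [b]).length : Nat) : Int) := by simp
        rw [h1, PySem.List.pySetD_natCast,
          show pre ++ b :: b :: t = (pre ++ [b]) ++ b :: t by simp,
          set_append_len (pre ++ [b]) b x t]
        simp
      rw [hstep]
      have := ih (pre ++ [b]) x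
      simp only [List.length_append, List.length_cons, List.length_nil] at this ⊢
      rw [show pre ++ b :: x :: t = (pre ++ [b]) ++ x :: t by simp] at *
      rw [show ((pre.length : Int) + 1) = ((pre.length + 1 : Nat) : Int) by push_cast; ring,
        show (pre.length : Int) + ((t.length + 1 : Nat) : Int) = ((pre.length + 1 : Nat) : Int) + (t.length : Int) by push_cast; ring]
      rw [this]
      simp [bpass, if_pos hxb]
    · have hstep : stepSwap (pre ++ x :: b :: t) (pre.length : Int) = pre ++ x :: b :: t := by
        rw [stepSwap, hget1, hget2, if_neg hxb]
      rw [hstep]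
      have := ih (pre ++ [x]) b
      simp only [List.length_append, List.length_cons, List.length_nil] at this ⊢
      rw [show pre ++ x :: b :: t = (pre ++ [x]) ++ b :: t by simp]
      rw [show ((pre.length : Int) + 1) = ((pre.length + 1 : Nat) : Int) by push_cast; ring,
        show (pre.length : Int) + ((t.length + 1 : Nat) : Int) = ((pre.length + 1 : Nat) : Int) + (t.length : Int) by push_cast; ring]
      rw [this]
      simp [bpass, if_neg hxb]

theorem passFold_eq (a : List Int) :
    (PySem.List.pyRange 0 (PySem.List.len a - 1) 1).foldl stepSwap a = bpass a := by
  cases a with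
  | nil => rw [PySem.List.pyRange_one_eq_nil (by simp [PySem.List.len])]; simp [bpass]
  | cons x l =>
    have h := innerFold l [] x
    simp only [List.length_nil, Nat.cast_zero, List.nil_append, zero_add] at h
    rw [show PySem.List.len (x :: l) - 1 = (l.length : Int) by
      simp [PySem.List.len_eq]]
    exact h

theorem foldl_ignore_iterate {α β : Type} (f : α → α) (l : List β) (x : α) :
    l.foldl (fun a _ => f a) x = f^[l.length] x := by
  induction l generalizing x with
  | nil => rfl
  | cons b t ih => simp [ih, Function.iterate_succ_apply]

theorem bubble_sorted (emergency : List Int) :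
    (PySem.List.pyRange 0 (PySem.List.len emergency) 1).foldl
        (fun a _i => (PySem.List.pyRange 0 (PySem.List.len a - 1) 1).foldl stepSwap a)
        emergency
      = PySem.List.sorted emergency (fun x => x) true := by
  rw [foldl_ignore_iterate]
  have hf : (fun a : List Int => (PySem.List.pyRange 0 (PySem.List.len a - 1) 1).foldl stepSwap a)
      = bpass := funext passFold_eq
  rw [hf, show (PySem.List.pyRange 0 (PySem.List.len emergency) 1).length = emergency.length by
    simp [PySem.List.length_pyRange_one, PySem.List.len_eq]]
  exact iterate_bpass_sorted emergency

theorem innerScan (s : List Int) (v : Int) (pre : List Int) (acc : List Int) :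
    (PySem.List.pyRange (pre.length : Int) ((pre.length : Int) + (s.length : Int)) 1).foldl
      (fun ans2 l => if v = PySem.List.pyGetD (pre ++ s) l 0 then ans2 ++ [l + 1] else ans2) acc
      = acc ++ occ s ((pre.length : Int) + 1) v := by
  induction s generalizing pre acc with
  | nil => simp [PySem.List.pyRange_one_eq_nil, occ]
  | cons y t ih =>
    rw [PySem.List.pyRange_one_cons (by push_cast [List.length_cons]; omega), List.foldl_cons]
    rw [getD_append_len pre y t]
    have hre : pre ++ y :: t = (pre ++ [y]) ++ t := by simp
    have hcast1 : (pre.length : Int) + 1 = (((pre ++ [y]).length : Nat) : Int) := by simp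
    have hcast2 : (pre.length : Int) + ((t.length + 1 : Nat) : Int)
        = (((pre ++ [y]).length : Nat) : Int) + (t.length : Int) := by push_cast; simp; ring
    by_cases hv : v = y
    · rw [if_pos hv]
      rw [hre, show (pre.length : Int) + 1 = (((pre ++ [y]).length : Nat) : Int) from hcast1]
      simp only [List.length_cons] at *
      rw [hcast2, ih (pre ++ [y])]
      simp [occ, hv]
    · rw [if_neg hv]
      rw [hre, hcast1]
      simp only [List.length_cons] at *
      rw [hcast2, ih (pre ++ [y])]
      simp [occ, hv]

-- B-side: the counting loop computes the filter length
theorem countGT_eq (emergency : List Int) (v : Int) (acc : Int) :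
    emergency.foldl (fun s u => if v < u then s + 1 else s) acc
      = acc + ((emergency.filter (fun u => v < u)).length : Int) := by
  induction emergency generalizing acc with
  | nil => simp
  | cons y t ih =>
    simp only [List.foldl_cons]
    by_cases h : v < y
    · rw [if_pos h, ih, List.filter_cons_of_pos (by simp [h])]
      push_cast [List.length_cons]; ring
    · rw [if_neg h, ih, List.filter_cons_of_neg (by simp [h])]

-- the positions of v in a descending-sorted list are the consecutive range starting after the greater elements
theorem occ_sorted_range (s : List Int) (v : Int) (i : Int)
    (hs : s.Pairwise (fun a b => b ≤ a)) :
    occ s i v = PySem.List.pyRange (i + ((s.filter (fun u => v < u)).length : Int))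
      (i + ((s.filter (fun u => v < u)).length : Int) + (s.count v : Int)) 1 := by
  induction s generalizing i with
  | nil => rw [PySem.List.pyRange_one_eq_nil (by simp)]; rfl
  | cons y t ih =>
    rw [List.pairwise_cons] at hs
    rcases lt_trichotomy v y with hvy | hvy | hvy
    · -- y > v : skip y, shift the range by one
      have hne : v ≠ y := ne_of_lt hvy
      have hc : (y :: t).count v = t.count v := by simp [List.count_cons]; omega
      rw [occ, if_neg hne, ih (i+1) hs.2,
        List.filter_cons_of_pos (by simp [hvy]), hc]
      congr 1 <;> (push_cast [List.length_cons]; ring)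
    · -- v = y : y contributes position i; no element of y :: t is greater than v
      subst hvy
      have hft : t.filter (fun u => v < u) = [] := by
        rw [List.filter_eq_nil_iff]
        intro u hu
        simpa using not_lt.mpr (hs.1 u hu)
      have hc : (v :: t).count v = t.count v + 1 := by simp [List.count_cons]
      rw [occ, if_pos rfl, ih (i+1) hs.2, hft,
        List.filter_cons_of_neg (by simp), hft, hc]
      simp only [List.length_nil, Nat.cast_zero, add_zero]
      conv_rhs => rw [PySem.List.pyRange_one_cons (by push_cast; omega)]
      congr 2 <;> (push_cast; ring)
    · -- y < v : v occurs nowhere in y :: t, both sides empty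
      have hne : v ≠ y := ne_of_gt hvy
      have hvt : v ∉ t := fun hm => absurd (hs.1 v hm) (by omega)
      have hft : t.filter (fun u => v < u) = [] := by
        rw [List.filter_eq_nil_iff]
        intro u hu
        have := hs.1 u hu; simp; omega
      have hc : (y :: t).count v = 0 := by
        simp [List.count_cons, List.count_eq_zero_of_not_mem hvt]; omega
      rw [occ, if_neg hne, ih (i+1) hs.2, hft, List.count_eq_zero_of_not_mem hvt,
        PySem.List.pyRange_one_eq_nil (by simp),
        List.filter_cons_of_neg (by simpa using not_lt.mpr hvy.le), hft, hc,
        PySem.List.pyRange_one_eq_nil (by simp)]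

-- the `first` dict of B looks up to its defining formula on every key it was built over
theorem first_getD (emergency : List Int) (ks : List Int) (hnd : ks.Nodup) (v : Int)
    (hv : v ∈ ks) :
    (ks.foldl (fun (d : PySem.Dict Int Int) v =>
        d.insert v (1 + emergency.foldl (fun s u => if v < u then s + 1 else s) 0))
      PySem.Dict.empty).getD v 0
      = 1 + emergency.foldl (fun s u => if v < u then s + 1 else s) 0 := by
  set f := fun v => 1 + emergency.foldl (fun s u => if v < u then s + 1 else s) (0 : Int) with hf
  have hitems : (ks.foldl
      (fun (d : PySem.Dict Int Int) v => d.insert v (f v)) PySem.Dict.empty).items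
      = ks.map (fun v => (v, f v)) := by
    have := PySem.Dict.items_foldl_insert_fresh (l := ks)
      (k := fun v => v) (v := f) (d := PySem.Dict.empty)
      (by intro a _; simp) (by simpa using hnd)
    simpa using this
  have hkeys : (ks.foldl
      (fun (d : PySem.Dict Int Int) v => d.insert v (f v)) PySem.Dict.empty).keys.Nodup := by
    simp only [PySem.Dict.keys, hitems, List.map_map]
    simpa [Function.comp_def] using hnd
  refine PySem.Dict.getD_of_mem_items _ ?_ hkeys _
  rw [hitems]
  exact List.mem_map.mpr ⟨v, hv, rfl⟩

-- ===== VERDICT (by name: the statement is the Claim_ definition above) =====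
theorem solution_spec : Claim_equal_solution := by
  intro emergency _
  unfold Spec_solution solution solution_alt
  rw [PySem.List.foldl_append_singleton_eq_self, List.nil_append]
  rw [bubble_sorted emergency]
  set s := PySem.List.sorted emergency (fun x => x) true with hs
  dsimp only
  have hlen : PySem.List.len emergency = (emergency.length : Int) := by simp [PySem.List.len_eq]
  rw [hlen]
  rw [PySem.List.foldl_pyRange_zero_pyGetD' emergency 0
    (fun ans v => (PySem.List.pyRange 0 (PySem.List.len s) 1).foldl
      (fun ans2 l => if v = PySem.List.pyGetD s l 0 then ans2 ++ [l + 1] else ans2) ans) []]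
  have hinner : ∀ (v : Int) (ans : List Int),
      (PySem.List.pyRange 0 (PySem.List.len s) 1).foldl
        (fun ans2 l => if v = PySem.List.pyGetD s l 0 then ans2 ++ [l + 1] else ans2) ans
      = ans ++ occ s 1 v := by
    intro v ans
    have h := innerScan s v [] ans
    simp only [List.length_nil, Nat.cast_zero, List.nil_append, zero_add] at h
    rw [show PySem.List.len s = (s.length : Int) by simp [PySem.List.len_eq]]
    exact h
  have houter : List.foldl (fun ans v =>
        (PySem.List.pyRange 0 (PySem.List.len s) 1).foldl
          (fun ans2 l => if v = PySem.List.pyGetD s l 0 then ans2 ++ [l + 1] else ans2) ans)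
      [] emergency
      = List.foldl (fun ans v => ans ++ occ s 1 v) [] emergency :=
    PySem.List.foldl_congr_mem emergency _ _ [] (fun acc x _ => hinner x acc)
  rw [houter]
  rw [PySem.List.foldl_append_eq_flatMap (fun v => occ s 1 v) emergency []]
  rw [List.nil_append]
  have hperm : s.Perm emergency := PySem.List.sorted_perm emergency (fun x => x) true
  have hsorted : s.Pairwise (fun a b => b ≤ a) :=
    (PySem.List.sorted_pairwise_rev emergency (fun x => x)).imp (fun h => by simpa using h)
  refine List.flatMap_congr ?_
  intro v hv
  rw [PySem.Dict.foldl_insert_getD_add_one_eq_counter, PySem.Dict.getD_counter,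
    first_getD emergency (PySem.Dict.counter emergency).keys
      (PySem.Dict.nodup_keys_counter emergency) v
      (by rw [PySem.Dict.keys_counter, ← PySem.List.dedup_eq_ofList]; exact (PySem.List.mem_dedup emergency v).mpr hv),
    countGT_eq emergency v 0,
    occ_sorted_range s v 1 hsorted]
  congr 1
  · rw [(hperm.filter _).length_eq]; ring
  · rw [(hperm.filter _).length_eq, hperm.count_eq]; ring
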